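-- pv_equiv track=rewrite | github.com/aceiii/advent-of-code-2025 | python/day04.py | remove_rolls
-- ===== SOURCE A (Python) =====
-- def remove_rolls(rows, to_remove):
--     new_rows = []
--     for y, row in enumerate(rows):
--         new_row = []
--         for x, tile in enumerate(row):
--             pos = x, y
--             if pos in to_remove:
--                 new_row.append('.')
--             else:
--                 new_row.append(tile)
--         new_rows.append(''.join(new_row))
--     return new_rows
-- ===== SOURCE B (Python) =====
-- def remove_rolls(rows, to_remove):
--     grid = [list(row) for row in rows]
--     for x, y in to_remove:
--         if 0 <= y < len(grid) and 0 <= x < len(grid[y]):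
--             grid[y][x] = '.'
--     return [''.join(r) for r in grid]
-- ===== Notes on version B (the rewrite author's own statement) =====
-- stated objective: faster
-- what changed: Instead of scanning every cell and testing membership in to_remove (an inner linear scan per cell), B converts rows to char lists once and applies each removal as a bounds-checked point update, then joins.
import Mathlib
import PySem

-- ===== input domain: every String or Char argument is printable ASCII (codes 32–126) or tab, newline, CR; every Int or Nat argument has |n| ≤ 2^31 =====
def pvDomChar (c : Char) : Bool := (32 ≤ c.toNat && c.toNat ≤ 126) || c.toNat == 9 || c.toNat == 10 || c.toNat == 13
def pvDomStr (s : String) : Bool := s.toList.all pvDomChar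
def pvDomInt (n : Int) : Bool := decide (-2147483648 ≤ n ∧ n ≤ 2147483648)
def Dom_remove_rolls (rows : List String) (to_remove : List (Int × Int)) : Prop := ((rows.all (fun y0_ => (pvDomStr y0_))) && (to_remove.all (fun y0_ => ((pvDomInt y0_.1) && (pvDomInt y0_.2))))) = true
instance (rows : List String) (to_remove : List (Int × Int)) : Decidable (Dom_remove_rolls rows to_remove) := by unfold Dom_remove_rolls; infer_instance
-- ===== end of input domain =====

-- B replaces A's per-cell membership scan over to_remove by bounds-checked point updates
-- on a char grid, rebuilding rows once at the end (objective: faster).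

-- ===== PORT A =====
def remove_rolls (rows : List String) (to_remove : List (Int × Int)) : List String :=
  (PySem.List.enumerate rows).foldl (fun new_rows yr =>
    new_rows ++ [String.ofList ((PySem.List.enumerate yr.2.toList).foldl (fun new_row xt =>
      new_row ++ [if (xt.1, yr.1) ∈ to_remove then '.' else xt.2]) [])]) []

-- ===== PORT B =====
-- one iteration of Source B's loop: the bounds-checked point update grid[y][x] = '.'
def pvUpd (g : List (List Char)) (p : Int × Int) : List (List Char) :=
  if 0 ≤ p.2 ∧ p.2 < (g.length : Int) ∧ 0 ≤ p.1 ∧ p.1 < (((g[p.2.toNat]?).getD []).length : Int)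
  then g.set p.2.toNat (((g[p.2.toNat]?).getD []).set p.1.toNat '.')
  else g

def remove_rolls_alt (rows : List String) (to_remove : List (Int × Int)) : List String :=
  (to_remove.foldl pvUpd (rows.map String.toList)).map String.ofList

-- ===== PRECONDITION & SPEC =====
def Spec_remove_rolls (rows : List String) (to_remove : List (Int × Int)) (out : List String) : Prop := out = remove_rolls_alt rows to_remove
instance (rows : List String) (to_remove : List (Int × Int)) (out : List String) : Decidable (Spec_remove_rolls rows to_remove out) := by unfold Spec_remove_rolls; infer_instance

-- ===== CLAIM (what is proved, stated in full; the proofs are below) =====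
def Claim_equal_remove_rolls : Prop := ∀ (rows : List String) (to_remove : List (Int × Int)), Dom_remove_rolls rows to_remove → Spec_remove_rolls rows to_remove (remove_rolls rows to_remove)

-- ===== LEMMAS AND PROOFS =====

lemma pvUpd_length (g : List (List Char)) (p : Int × Int) : (pvUpd g p).length = g.length := by
  unfold pvUpd; split <;> simp

lemma pvFold_length (tr : List (Int × Int)) (g : List (List Char)) :
    (tr.foldl pvUpd g).length = g.length := by
  induction tr generalizing g with
  | nil => rfl
  | cons p rest ih => rw [List.foldl_cons, ih, pvUpd_length]

lemma pvUpd_row_length (g : List (List Char)) (p : Int × Int) (y : Nat) :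
    (((pvUpd g p)[y]?).getD []).length = ((g[y]?).getD []).length := by
  unfold pvUpd
  split
  · rename_i hc
    by_cases h : p.2.toNat = y
    · have hl : p.2.toNat < g.length := by omega
      subst h
      rw [List.getElem?_set_self hl]
      simp
    · rw [List.getElem?_set_ne h]
  · rfl

lemma pvFold_row_length (tr : List (Int × Int)) (g : List (List Char)) (y : Nat) :
    (((tr.foldl pvUpd g)[y]?).getD []).length = ((g[y]?).getD []).length := by
  induction tr generalizing g with
  | nil => rfl
  | cons p rest ih => rw [List.foldl_cons, ih, pvUpd_row_length]

lemma pvUpd_get (g : List (List Char)) (p : Int × Int) (y x : Nat)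
    (hy : y < g.length) (hx : x < ((g[y]?).getD []).length) :
    ((((pvUpd g p)[y]?).getD [])[x]?).getD '?' =
      if p = ((x : Int), (y : Int)) then '.' else (((g[y]?).getD [])[x]?).getD '?' := by
  obtain ⟨a, b⟩ := p
  unfold pvUpd
  split
  · rename_i hc
    simp only at hc
    obtain ⟨hb0, hbl, ha0, hal⟩ := hc
    by_cases hby : b.toNat = y
    · have hbl' : b.toNat < g.length := by omega
      by_cases hax : a.toNat = x
      · have hpeq : ((a, b) : Int × Int) = ((x : Int), (y : Int)) := by
          have h1 := Int.toNat_of_nonneg ha0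
          have h2 := Int.toNat_of_nonneg hb0
          simp only [Prod.mk.injEq]
          omega
        rw [if_pos hpeq, ← hby, List.getElem?_set_self hbl']
        simp only [Option.getD_some]
        have hxlen : a.toNat < ((g[b.toNat]?).getD []).length := by
          rw [hby]; omega
        rw [← hax, List.getElem?_set_self hxlen]
        rfl
      · have hpne : ((a, b) : Int × Int) ≠ ((x : Int), (y : Int)) := by
          intro h
          have h1 : a = (x : Int) := congrArg Prod.fst h
          omega
        rw [if_neg hpne, ← hby, List.getElem?_set_self hbl']
        simp only [Option.getD_some]
        rw [List.getElem?_set_ne hax, hby]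
    · have hpne : ((a, b) : Int × Int) ≠ ((x : Int), (y : Int)) := by
        intro h
        have h2 : b = (y : Int) := congrArg Prod.snd h
        omega
      rw [if_neg hpne, List.getElem?_set_ne hby]
  · rename_i hc
    have hpne : ((a, b) : Int × Int) ≠ ((x : Int), (y : Int)) := by
      intro h
      apply hc
      have h1 : a = (x : Int) := congrArg Prod.fst h
      have h2 : b = (y : Int) := congrArg Prod.snd h
      subst h1; subst h2
      refine ⟨?_, ?_, ?_, ?_⟩
      · show (0 : Int) ≤ (y : Int); positivity
      · show ((y : Int)) < (g.length : Int); exact_mod_cast hy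
      · show (0 : Int) ≤ (x : Int); positivity
      · show ((x : Int)) < ((((g[((y : Int)).toNat]?).getD []).length : Nat) : Int)
        have hxy : ((y : Int)).toNat = y := by omega
        rw [hxy]
        exact_mod_cast hx
    rw [if_neg hpne]

lemma pvFold_get (tr : List (Int × Int)) (g : List (List Char)) (y x : Nat)
    (hy : y < g.length) (hx : x < ((g[y]?).getD []).length) :
    ((((tr.foldl pvUpd g)[y]?).getD [])[x]?).getD '?' =
      if ((x : Int), (y : Int)) ∈ tr then '.' else (((g[y]?).getD [])[x]?).getD '?' := by
  induction tr generalizing g with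
  | nil => simp
  | cons p rest ih =>
    have hy' : y < (pvUpd g p).length := by rw [pvUpd_length]; exact hy
    have hx' : x < (((pvUpd g p)[y]?).getD []).length := by rw [pvUpd_row_length]; exact hx
    rw [List.foldl_cons, ih (pvUpd g p) hy' hx', pvUpd_get g p y x hy hx]
    by_cases hmem : ((x : Int), (y : Int)) ∈ rest
    · simp [hmem]
    · by_cases hp : p = ((x : Int), (y : Int))
      · rw [hp]
        simp [hmem]
      · have hne : ((x : Int), (y : Int)) ≠ p := fun h => hp h.symm
        simp [hmem, hp, List.mem_cons, hne]

lemma remove_rolls_eq_map (rows : List String) (tr : List (Int × Int)) :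
    remove_rolls rows tr =
      (PySem.List.enumerate rows).map (fun yr =>
        String.ofList ((PySem.List.enumerate yr.2.toList).map (fun xt =>
          if (xt.1, yr.1) ∈ tr then '.' else xt.2))) := by
  unfold remove_rolls
  simp only [PySem.List.foldl_append_singleton_eq_map, List.nil_append]

lemma pvGrid_eq (rows : List String) (tr : List (Int × Int)) :
    (PySem.List.enumerate rows).map (fun yr =>
        (PySem.List.enumerate yr.2.toList).map (fun xt =>
          if (xt.1, yr.1) ∈ tr then '.' else xt.2)) =
      tr.foldl pvUpd (rows.map String.toList) := by
  set g : List (List Char) := rows.map String.toList with hg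
  apply List.ext_getElem
  · simp [pvFold_length, hg]
  · intro y hyA hyB
    have hyr : y < rows.length := by
      simpa using hyA
    have hgylen : y < g.length := by simpa [hg] using hyr
    have hgy : (g[y]?).getD [] = rows[y].toList := by
      simp [hg, List.getElem?_eq_getElem hyr]
    have hfoldy : y < (tr.foldl pvUpd g).length := by rw [pvFold_length]; exact hgylen
    rw [List.getElem_map]
    have hrowlen := pvFold_row_length tr g y
    rw [hgy, List.getElem?_eq_getElem hfoldy, Option.getD_some] at hrowlen
    apply List.ext_getElem
    · simp only [PySem.List.getElem_enumerate, List.length_map, PySem.List.length_enumerate]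
      simpa using hrowlen.symm
    · intro x hxA hxB
      have hxr : x < rows[y].toList.length := by
        simpa [PySem.List.getElem_enumerate] using hxA
      have hxg : x < ((g[y]?).getD []).length := by rw [hgy]; exact hxr
      have hfold := pvFold_get tr g y x hgylen hxg
      rw [List.getElem?_eq_getElem hfoldy, Option.getD_some] at hfold
      have hfx : x < ((tr.foldl pvUpd g)[y]).length := hxB
      rw [List.getElem?_eq_getElem hfx, Option.getD_some] at hfold
      simp only [PySem.List.getElem_enumerate, List.getElem_map, zero_add]
      rw [hfold, hgy, List.getElem?_eq_getElem hxr, Option.getD_some]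

-- ===== VERDICT (by name: the statement is the Claim_ definition above) =====
theorem remove_rolls_spec : Claim_equal_remove_rolls := by
  intro rows tr _dom
  unfold Spec_remove_rolls remove_rolls_alt
  rw [remove_rolls_eq_map, ← pvGrid_eq, List.map_map]
  rfl
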